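-- pv_equiv track=rewrite | github.com/biankabakullari/UncertainLogProbabilities | code/Trace_Realizations_Alg/combine_With_swapping.py | combine_With_swapping
-- ===== SOURCE A (Python) =====
-- import itertools as it
--
-- def interweave(sb, s, start_pos=0):
--     if not sb:  # if sb is empty, you are done
--         return [s]
--
--     sequences = []
--     event = sb[0]
--     for pos in range(start_pos, len(s) + 1):
--         s_new = s.copy()
--         s_new.insert(pos, event)
--         sequences += interweave(sb[1:], s_new, pos + 1)
--     return sequences
--
-- def combine_With_swapping(Pi_lists):
--     k = len(Pi_lists)
--     if k == 1:
--         # Input is [P], return P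
--         return Pi_lists[0]
--
--         # input is [P1,...,Pk] with k > 1
--     full_sequences = []
--
--     # stays true if all sets have only a sequence with one single element
--     all_singletons = True
--     # indices of sets with only one element which is a singleton list
--     singleton_sets = []
--
--     for i in range(k):
--         Pi_size = len(Pi_lists[i])
--         for j in range(Pi_size):
--             if len(Pi_lists[i][j]) == 1:
--                 if i not in singleton_sets:
--                     singleton_sets.append(i)
--             else:
--                 all_singletons = False
--                 # the index of the only set with longer sequence(s), if there is one
--                 non_singleton = i
--
--     if all_singletons == True:
--         Pi_singletons = Pi_lists
--     else:
--         Pi_singletons = [Pi_lists[x] for x in singleton_sets]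
--     # save here all sequences emerging from concatenating only singleton sets
--     singleton_sequences = []
--     # if all sets are indeed only singleton sets, any order between them is valid
--     index_permutations = it.permutations(range(len(Pi_singletons)))
--     for permutation in index_permutations:
--         sequence = []
--         for index in permutation:
--             # accessing the index-th list of form [x], get x
--             sequence += Pi_singletons[index][0]
--         singleton_sequences.append(sequence)
--
--     if all_singletons == True:
--         # since there is no non-singleton set, singleton sequences are already the full sequences
--         return singleton_sequences
--     else:
--         big_set = Pi_lists[non_singleton]
--         # go through each sequence in the single big component (big component could contain many sequences)
--         for sb in big_set:
--             for s in singleton_sequences: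
--                 interweavings = interweave(sb, s)
--                 for sequence in interweavings:
--                     full_sequences.append(sequence)
--         return full_sequences
-- ===== SOURCE B (Python) =====
-- import itertools as it
--
--
-- def merge(sb, s, places, pos=0):
--     # rebuild the interleaved sequence position by position:
--     # positions listed in `places` take the next element of sb, the others the next of s
--     if not sb and not s:
--         return []
--     if pos in places:
--         return [sb[0]] + merge(sb[1:], s, places, pos + 1)
--     return [s[0]] + merge(sb, s[1:], places, pos + 1)
--
--
-- def combine_With_swapping(Pi_lists):
--     k = len(Pi_lists)
--     if k == 1:
--         return Pi_lists[0]
--     all_singletons = all(len(seq) == 1 for P in Pi_lists for seq in P)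
--     if all_singletons:
--         Pi_singletons = Pi_lists
--     else:
--         Pi_singletons = [P for P in Pi_lists if any(len(seq) == 1 for seq in P)]
--         non_singleton = [i for i, P in enumerate(Pi_lists)
--                          if any(len(seq) != 1 for seq in P)][-1]
--     singleton_sequences = [[x for index in perm for x in Pi_singletons[index][0]]
--                            for perm in it.permutations(range(len(Pi_singletons)))]
--     if all_singletons:
--         return singleton_sequences
--     return [merge(sb, s, places)
--             for sb in Pi_lists[non_singleton]
--             for s in singleton_sequences
--             for places in it.combinations(range(len(sb) + len(s)), len(sb))]
-- ===== Notes on version B (the rewrite author's own statement) =====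
-- stated objective: alternative
-- what changed: A's recursive interweave (insert the next element at every legal position, copy the list, recurse) is replaced by directly enumerating itertools.combinations of slot positions and rebuilding each merged sequence once, and A's index-bookkeeping scan loop (all_singletons / singleton_sets / non_singleton accumulators) is replaced by comprehensions over enumerate.
import Mathlib
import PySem

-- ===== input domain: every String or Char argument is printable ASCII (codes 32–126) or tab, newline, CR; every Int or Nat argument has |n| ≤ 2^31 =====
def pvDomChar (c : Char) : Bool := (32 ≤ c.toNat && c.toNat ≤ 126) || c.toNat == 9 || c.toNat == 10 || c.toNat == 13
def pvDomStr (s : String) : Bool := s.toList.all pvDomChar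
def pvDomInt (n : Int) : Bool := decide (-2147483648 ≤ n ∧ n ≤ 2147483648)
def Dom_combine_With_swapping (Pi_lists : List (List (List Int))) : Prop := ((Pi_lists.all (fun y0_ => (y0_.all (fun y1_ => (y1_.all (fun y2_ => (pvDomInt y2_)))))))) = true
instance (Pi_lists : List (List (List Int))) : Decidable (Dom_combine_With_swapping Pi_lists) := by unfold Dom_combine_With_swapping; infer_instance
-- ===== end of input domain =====

-- B replaces A's recursive `interweave` by enumerating itertools.combinations of slot
-- positions and rebuilding each merged sequence directly, and replaces A's
-- index-bookkeeping scan loop by comprehensions (objective: alternative algorithm).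

-- ===== PORT A =====
def interweave (sb : List Int) (s : List Int) (start_pos : Int) : List (List Int) :=
  match sb with
  | [] => [s]
  | event :: rest =>
      (PySem.List.pyRange start_pos ((s.length : Int) + 1) 1).foldl
        (fun sequences pos =>
          sequences ++ interweave rest (PySem.List.insert s pos event) (pos + 1))
        []

def scanStep (i : Int) (st : Bool × List Int × Int) (sij : List Int) :
    Bool × List Int × Int :=
  if sij.length == 1 then
    (if st.2.1.contains i then st else (st.1, st.2.1 ++ [i], st.2.2))
  else (false, st.2.1, i)

def scanSet (st : Bool × List Int × Int) (q : Int × List (List Int)) :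
    Bool × List Int × Int :=
  (PySem.List.pyRange 0 (PySem.List.len q.2) 1).foldl
    (fun st j => scanStep q.1 st (PySem.List.pyGetD q.2 j [])) st


def combine_With_swapping (Pi_lists : List (List (List Int))) : List (List Int) :=
  let k : Int := PySem.List.len Pi_lists
  if k == 1 then PySem.List.pyGetD Pi_lists 0 []
  else
    let st :=
      (PySem.List.pyRange 0 k 1).foldl
        (fun st i => scanSet st (i, PySem.List.pyGetD Pi_lists i []))
        ((true : Bool), ([] : List Int), (0 : Int))
    let all_singletons := st.1
    let singleton_sets := st.2.1
    let non_singleton := st.2.2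
    let Pi_singletons :=
      if all_singletons then Pi_lists
      else singleton_sets.map (fun x => PySem.List.pyGetD Pi_lists x [])
    let idxs := PySem.List.pyRange 0 (PySem.List.len Pi_singletons) 1
    let singleton_sequences :=
      (PySem.List.permutations idxs idxs.length).map (fun perm =>
        perm.foldl (fun seq index =>
          seq ++ PySem.List.pyGetD (PySem.List.pyGetD Pi_singletons index []) 0 []) [])
    if all_singletons then singleton_sequences
    else
      let big_set := PySem.List.pyGetD Pi_lists non_singleton []
      big_set.foldl (fun acc sb =>
        singleton_sequences.foldl (fun acc2 s =>
          (interweave sb s 0).foldl (fun a q => a ++ [q]) acc2) acc) []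

-- ===== PORT B =====
-- `sb[0]` / `s[0]` in Source B's merge raise IndexError on an empty list; that is
-- unreachable for the index tuples combinations yields, the port returns [] there.
def merge (sb : List Int) (s : List Int) (places : List Int) (pos : Int) : List Int :=
  match sb, s with
  | [], [] => []
  | sb, s =>
    if places.contains pos then
      match sb with
      | [] => []
      | e :: sbR => e :: merge sbR s places (pos + 1)
    else
      match s with
      | [] => []
      | x :: sR => x :: merge sb sR places (pos + 1)
termination_by sb.length + s.length
decreasing_by all_goals simp_all


def combine_With_swapping_alt (Pi_lists : List (List (List Int))) : List (List Int) :=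
  if PySem.List.len Pi_lists == 1 then PySem.List.pyGetD Pi_lists 0 []
  else
    let all_singletons := Pi_lists.all (fun P => P.all (fun seq => seq.length == 1))
    let Pi_singletons :=
      if all_singletons then Pi_lists
      else Pi_lists.filter (fun P => P.any (fun seq => seq.length == 1))
    let idxs := PySem.List.pyRange 0 (PySem.List.len Pi_singletons) 1
    let singleton_sequences :=
      (PySem.List.permutations idxs idxs.length).map (fun perm =>
        perm.flatMap (fun index =>
          PySem.List.pyGetD (PySem.List.pyGetD Pi_singletons index []) 0 []))
    if all_singletons then singleton_sequences
    else
      let non_singleton :=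
        PySem.List.pyGetD
          (((PySem.List.enumerate Pi_lists).filter
              (fun iP => iP.2.any (fun seq => seq.length != 1))).map (·.1)) (-1) 0
      (PySem.List.pyGetD Pi_lists non_singleton []).flatMap (fun sb =>
        singleton_sequences.flatMap (fun s =>
          (PySem.List.combinations
              (PySem.List.pyRange 0 ((sb.length : Int) + (s.length : Int)) 1)
              sb.length).map (fun places => merge sb s places 0)))

-- ===== PRECONDITION & SPEC =====
-- Pre_ excludes exactly the inputs on which A raises IndexError (Pi_singletons[index][0]
-- on an empty set): k ≠ 1, every sequence a singleton, yet some set empty.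
def Pre_combine_With_swapping (Pi_lists : List (List (List Int))) : Prop :=
  Pi_lists.length = 1 ∨
  (∃ P ∈ Pi_lists, ∃ seq ∈ P, seq.length ≠ 1) ∨
  (∀ P ∈ Pi_lists, P ≠ [])
instance (Pi_lists : List (List (List Int))) : Decidable (Pre_combine_With_swapping Pi_lists) := by unfold Pre_combine_With_swapping; infer_instance

def pvWitness_combine_With_swapping : List (List (List Int)) := [[[1]], [[2, 3], [4]]]

def Spec_combine_With_swapping (Pi_lists : List (List (List Int))) (out : List (List Int)) : Prop := out = combine_With_swapping_alt Pi_lists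
instance (Pi_lists : List (List (List Int))) (out : List (List Int)) : Decidable (Spec_combine_With_swapping Pi_lists out) := by unfold Spec_combine_With_swapping; infer_instance

-- ===== CLAIM (what is proved, stated in full; the proofs are below) =====
def Claim_equal_combine_With_swapping : Prop := ∀ (Pi_lists : List (List (List Int))), Dom_combine_With_swapping Pi_lists → Pre_combine_With_swapping Pi_lists → Spec_combine_With_swapping Pi_lists (combine_With_swapping Pi_lists)

-- ===== LEMMAS AND PROOFS =====

theorem comb_pyRange_succ (a b : Int) (r : Nat) :
    PySem.List.combinations (PySem.List.pyRange a b 1) (r + 1) =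
      (PySem.List.pyRange a b 1).flatMap (fun q =>
        (PySem.List.combinations (PySem.List.pyRange (q + 1) b 1) r).map (q :: ·)) := by
  generalize hn : (b - a).toNat = n
  induction n generalizing a with
  | zero =>
      have h : b ≤ a := by omega
      rw [PySem.List.pyRange_one_eq_nil h]
      simp [PySem.List.combinations_nil_succ]
  | succ n ih =>
      have h : a < b := by omega
      rw [PySem.List.pyRange_one_cons h, PySem.List.combinations_cons_succ,
          List.flatMap_cons]
      rw [ih (a + 1) (by omega)]

theorem comb_pyRange_nil (a b : Int) (r : Nat) (h : b - a < (r : Int) + 1) :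
    PySem.List.combinations (PySem.List.pyRange a b 1) (r + 1) = [] := by
  apply PySem.List.combinations_eq_nil_of_length_lt
  rw [PySem.List.length_pyRange_one]
  omega

theorem merge_cons_mem (e : Int) (sb s places : List Int) (pos : Int)
    (h : places.contains pos = true) :
    merge (e :: sb) s places pos = e :: merge sb s places (pos + 1) := by
  rw [merge.eq_def]; simp only [h]; simp at h ⊢

theorem merge_cons_notmem (sb : List Int) (x : Int) (sR places : List Int) (pos : Int)
    (h : places.contains pos = false) :
    merge sb (x :: sR) places pos = x :: merge sb sR places (pos + 1) := by
  rw [merge.eq_def]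
  rcases sb with _ | ⟨e, sbR⟩ <;> simp_all

theorem not_contains_of_lt (places : List Int) (q pos : Int)
    (h3 : ∀ x ∈ places, q < x) (hle : pos ≤ q) : places.contains pos = false := by
  rw [List.contains_eq_any_beq]
  simp only [List.any_eq_false, beq_iff_eq]
  intro x hx hxe
  have := h3 x hx; omega

theorem merge_nil_nil (places : List Int) (pos : Int) : merge [] [] places pos = [] := by
  rw [merge.eq_def]

theorem merge_congr (n : Nat) : ∀ (sb s places places' : List Int) (pos : Int),
    sb.length + s.length ≤ n →
    (∀ p : Int, pos ≤ p → places.contains p = places'.contains p) →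
    merge sb s places pos = merge sb s places' pos := by
  induction n with
  | zero =>
      intro sb s places places' pos hlen _
      have : sb = [] ∧ s = [] := by constructor <;> (cases sb <;> cases s <;> simp_all)
      simp [this.1, this.2, merge]
  | succ n ih =>
      intro sb s places places' pos hlen hc
      have hcp : ∀ p : Int, pos + 1 ≤ p → places.contains p = places'.contains p :=
        fun p hp => hc p (by omega)
      by_cases hm : places.contains pos = true
      · have hm' : places'.contains pos = true := by rw [← hc pos le_rfl]; exact hm
        rcases sb with _ | ⟨e, sbR⟩
        · rcases s with _ | ⟨x, sR⟩
          · simp [merge_nil_nil]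
          · rw [merge.eq_def]; rw [merge.eq_def (sb := [])]; simp only [hm, hm']; simp
        · rw [merge_cons_mem e sbR s places pos hm, merge_cons_mem e sbR s places' pos hm']
          rw [ih sbR s places places' (pos + 1) (by simp at hlen ⊢; omega) hcp]
      · have hm0 : places.contains pos = false := by simpa using hm
        have hm' : places'.contains pos = false := by rw [← hc pos le_rfl]; exact hm0
        rcases s with _ | ⟨x, sR⟩
        · rcases sb with _ | ⟨e, sbR⟩
          · simp [merge_nil_nil]
          · rw [merge.eq_def]; rw [merge.eq_def (sb := e :: sbR)]; simp only [hm0, hm']; simp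
        · rw [merge_cons_notmem sb x sR places pos hm0,
              merge_cons_notmem sb x sR places' pos hm']
          rw [ih sb sR places places' (pos + 1) (by simp at hlen ⊢; omega) hcp]

theorem merge_nil (s : List Int) (pos : Int) : merge [] s [] pos = s := by
  induction s generalizing pos with
  | nil => simp [merge]
  | cons x sR ih =>
      rw [merge_cons_notmem [] x sR [] pos (by simp)]
      rw [ih]

theorem insert_cons_of_pos (x : Int) (sR : List Int) (i : Int) (e : Int)
    (h1 : 1 ≤ i) (h2 : i ≤ (sR.length : Int) + 1) :
    PySem.List.insert (x :: sR) i e = x :: PySem.List.insert sR (i - 1) e := by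
  have hi : i = ((i.toNat : Int)) := by omega
  rw [hi, PySem.List.insert_natCast (x :: sR) i.toNat e (by simp; omega)]
  have h4 : ((i.toNat : Int)) - 1 = (((i.toNat - 1 : Nat) : Int)) := by omega
  rw [h4, PySem.List.insert_natCast sR (i.toNat - 1) e (by simp; omega)]
  obtain ⟨m, hm⟩ := Nat.exists_eq_add_of_le (by omega : 1 ≤ i.toNat)
  have hm' : i.toNat = m + 1 := by omega
  rw [hm']
  simp [List.take_succ_cons, List.drop_succ_cons]

theorem merge_insert (e : Int) (sb s places : List Int) (q : Int)
    (h3 : ∀ x ∈ places, q < x) : ∀ (pos : Int),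
    pos ≤ q → q ≤ pos + (s.length : Int) →
    merge (e :: sb) s (q :: places) pos =
      merge sb (PySem.List.insert s (q - pos) e) places pos := by
  induction s with
  | nil =>
      intro pos h1 h2
      have hq : q = pos := by simp at h2; omega
      subst hq
      rw [merge_cons_mem e sb [] (q :: places) q (by simp)]
      simp only [sub_self, PySem.List.insert_zero]
      rw [merge_cons_notmem sb e [] places q
        (not_contains_of_lt places q q h3 le_rfl)]
      congr 1
      exact merge_congr (sb.length + 1) sb [] (q :: places) places (q + 1) (by simp)
        (fun p hp => by simp; intro h; omega)
  | cons x sR ih =>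
      intro pos h1 h2
      by_cases hq : q = pos
      · subst hq
        rw [merge_cons_mem e sb (x :: sR) (q :: places) q (by simp)]
        simp only [sub_self, PySem.List.insert_zero]
        rw [merge_cons_notmem sb e (x :: sR) places q
          (not_contains_of_lt places q q h3 le_rfl)]
        congr 1
        exact merge_congr (sb.length + (x :: sR).length) sb (x :: sR) (q :: places)
          places (q + 1) (by simp)
          (fun p hp => by simp; intro h; omega)
      · have hlt : pos < q := lt_of_le_of_ne h1 (fun h => hq h.symm)
        have hnc : (q :: places).contains pos = false := by
          apply not_contains_of_lt (q :: places) pos pos _ le_rfl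
          intro y hy
          rcases List.mem_cons.mp hy with h | h
          · omega
          · have := h3 y h; omega
        rw [merge_cons_notmem (e :: sb) x sR (q :: places) pos hnc]
        rw [ih (pos + 1) (by omega) (by simp at h2 ⊢; omega)]
        rw [insert_cons_of_pos x sR (q - pos) e (by omega) (by simp at h2 ⊢; omega)]
        rw [merge_cons_notmem sb x (PySem.List.insert sR (q - pos - 1) e) places pos
          (not_contains_of_lt places q pos h3 h1)]
        have : q - pos - 1 = q - (pos + 1) := by omega
        rw [this]


theorem scanSet_eq_foldl (st : Bool × List Int × Int) (q : Int × List (List Int)) :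
    scanSet st q = q.2.foldl (scanStep q.1) st := by
  unfold scanSet
  exact PySem.List.foldl_pyRange_zero_pyGetD q.2 [] (scanStep q.1) st

theorem inner_mem (i : Int) : ∀ (P : List (List Int)) (alls : Bool) (ss : List Int) (ns : Int),
    ss.contains i = true →
    P.foldl (scanStep i) (alls, ss, ns) =
      (alls && P.all (fun t => t.length == 1), ss,
       if P.any (fun t => t.length != 1) then i else ns) := by
  intro P
  induction P with
  | nil => intro alls ss ns h; simp
  | cons t P' ih =>
      intro alls ss ns h
      by_cases ht : t.length = 1
      · simp only [List.foldl_cons, scanStep, ht, beq_self_eq_true, if_true, h]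
        rw [ih alls ss ns h]
        simp [ht]
      · have ht' : (t.length == 1) = false := by simpa using ht
        simp only [List.foldl_cons, scanStep, ht', Bool.false_eq_true, if_false]
        rw [ih false ss i h]
        simp only [Bool.false_and]
        simp [ht']
        exact fun h1 _ => absurd h1 ht

theorem inner_new (i : Int) : ∀ (P : List (List Int)) (alls : Bool) (ss : List Int) (ns : Int),
    ss.contains i = false →
    P.foldl (scanStep i) (alls, ss, ns) =
      (alls && P.all (fun t => t.length == 1),
       if P.any (fun t => t.length == 1) then ss ++ [i] else ss,
       if P.any (fun t => t.length != 1) then i else ns) := by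
  intro P
  induction P with
  | nil => intro alls ss ns h; simp
  | cons t P' ih =>
      intro alls ss ns h
      by_cases ht : t.length = 1
      · simp only [List.foldl_cons, scanStep, ht, beq_self_eq_true, if_true, h,
          Bool.false_eq_true, if_false]
        rw [inner_mem i P' alls (ss ++ [i]) ns (by simp)]
        simp [ht]
      · have ht' : (t.length == 1) = false := by simpa using ht
        simp only [List.foldl_cons, scanStep, ht', Bool.false_eq_true, if_false]
        rw [ih false ss i h]
        simp [ht']
        exact fun h1 _ => absurd h1 ht

theorem outer_char : ∀ (Pi : List (List (List Int))) (i0 : Int) (alls : Bool)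
    (ss : List Int) (ns : Int), (∀ x ∈ ss, x < i0) →
    (PySem.List.enumerate Pi i0).foldl scanSet (alls, ss, ns) =
      (alls && Pi.all (fun P => P.all (fun t => t.length == 1)),
       ss ++ ((PySem.List.enumerate Pi i0).filter
                (fun q => q.2.any (fun t => t.length == 1))).map (·.1),
       (((PySem.List.enumerate Pi i0).filter
                (fun q => q.2.any (fun t => t.length != 1))).map (·.1)).getLastD ns) := by
  intro Pi
  induction Pi with
  | nil => intro i0 alls ss ns hb; simp [PySem.List.enumerate_nil]
  | cons P Pi' ih =>
      intro i0 alls ss ns hb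
      rw [PySem.List.enumerate_cons, List.foldl_cons, scanSet_eq_foldl]
      simp only
      rw [inner_new i0 P alls ss ns
        (by rw [List.contains_eq_any_beq]; simp only [List.any_eq_false, beq_iff_eq]
            intro x hx h; have := hb x hx; omega)]
      rw [ih (i0 + 1) (alls && P.all (fun t => t.length == 1))
        (if P.any (fun t => t.length == 1) then ss ++ [i0] else ss)
        (if P.any (fun t => t.length != 1) then i0 else ns)
        (by intro x hx
            by_cases hP : P.any (fun t => t.length == 1) <;> simp [hP] at hx
            · rcases hx with hx | hx
              · have := hb x hx; omega
              · omega
            · have := hb x hx; omega)]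
      refine Prod.ext ?_ (Prod.ext ?_ ?_) <;> simp only [List.filter_cons]
      · simp [Bool.and_assoc]
      · by_cases hP : P.any (fun t => t.length == 1) <;> simp [hP]
      · by_cases hP : (P.any fun t => t.length != 1) = true
        · simp only [hP, if_true, List.map_cons, List.getLastD_cons]
        · rw [if_neg hP, if_neg hP]

theorem enum_filter_getD (p : List (List Int) → Bool) :
    ∀ (L pre : List (List (List Int))),
    ((PySem.List.enumerate L (pre.length : Int)).filter (fun q => p q.2)).map
        (fun q => PySem.List.pyGetD (pre ++ L) q.1 []) = L.filter p := by
  intro L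
  induction L with
  | nil => intro pre; simp [PySem.List.enumerate_nil]
  | cons P L' ih =>
      intro pre
      rw [PySem.List.enumerate_cons, List.filter_cons]
      have hpre : ((pre.length : Int) + 1) = (((pre ++ [P]).length : Int)) := by
        simp
      have happ : pre ++ P :: L' = (pre ++ [P]) ++ L' := by simp
      by_cases hP : p P = true
      · simp only [hP, if_pos, List.map_cons]
        rw [List.filter_cons, hP, if_pos rfl]
        congr 1
        · show PySem.List.pyGetD (pre ++ P :: L') (pre.length : Int) [] = P
          rw [PySem.List.pyGetD_natCast]
          simp
        · rw [happ, hpre, ih (pre ++ [P])]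
      · have hP' : p P = false := by simpa using hP
        simp only [hP', Bool.false_eq_true, if_false]
        rw [List.filter_cons, hP', if_neg (by simp)]
        rw [happ, hpre, ih (pre ++ [P])]
theorem interweave_eq_comb (sb : List Int) : ∀ (s : List Int) (p : Int), 0 ≤ p →
    interweave sb s p =
      (PySem.List.combinations
          (PySem.List.pyRange p ((s.length : Int) + (sb.length : Int)) 1)
          sb.length).map (fun places => merge sb s places 0) := by
  induction sb with
  | nil =>
      intro s p hp
      simp [interweave, PySem.List.combinations_zero, merge_nil]
  | cons e rest ih =>
      intro s p hp
      set r := rest.length with hr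
      have hn : (s.length : Int) + ((e :: rest).length : Int) = (s.length : Int) + r + 1 := by
        simp [hr]; omega
      rw [interweave, PySem.List.foldl_append_eq_flatMap, List.nil_append]
      rw [hn, List.length_cons, comb_pyRange_succ, List.map_flatMap]
      by_cases hps : p ≤ (s.length : Int) + 1
      · rw [PySem.List.pyRange_one_append p ((s.length : Int) + 1) ((s.length : Int) + r + 1)
            hps (by omega), List.flatMap_append]
        have htail : (PySem.List.pyRange ((s.length : Int) + 1) ((s.length : Int) + r + 1) 1).flatMap
            (fun q => ((PySem.List.combinations
                (PySem.List.pyRange (q + 1) ((s.length : Int) + r + 1) 1) r).map (q :: ·)).map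
                  (fun places => merge (e :: rest) s places 0)) = [] := by
          apply List.flatMap_eq_nil_iff.mpr
          intro q hq
          rw [PySem.List.mem_pyRange_one] at hq
          rcases r with _ | r'
          · omega
          · rw [comb_pyRange_nil _ _ r' (by omega)]
            simp
        rw [htail, List.append_nil]
        apply List.flatMap_congr
        intro q hq
        rw [PySem.List.mem_pyRange_one] at hq
        have hins : ((PySem.List.insert s q e).length : Int) = (s.length : Int) + 1 := by
          rw [PySem.List.length_insert]; push_cast; ring
        rw [ih (PySem.List.insert s q e) (q + 1) (by omega), hins]
        have harg : (s.length : Int) + 1 + (r : Int) = (s.length : Int) + r + 1 := by ring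
        rw [harg, List.map_map]
        apply List.map_congr_left
        intro pl hpl
        have hsub := PySem.List.sublist_of_mem_combinations hpl
        have hgt : ∀ x ∈ pl, q < x := by
          intro x hx
          have := hsub.mem hx
          rw [PySem.List.mem_pyRange_one] at this
          omega
        simp only [Function.comp_apply]
        rw [merge_insert e rest s pl q hgt 0 (by omega) (by omega)]
        simp
      · rw [PySem.List.pyRange_one_eq_nil (by omega : (s.length : Int) + 1 ≤ p),
            List.flatMap_nil]
        symm
        apply List.flatMap_eq_nil_iff.mpr
        intro q hq
        rw [PySem.List.mem_pyRange_one] at hq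
        rcases r with _ | r'
        · omega
        · rw [← hr, comb_pyRange_nil _ _ r' (by push_cast; omega)]
          simp

theorem getLastD_of_ne_nil (l : List Int) (h : l ≠ []) (d : Int) :
    l.getLastD d = l.getLast h := by
  rw [List.getLastD_eq_getLast?, List.getLast?_eq_getLast_of_ne_nil h]
  rfl

theorem filtered_ne_nil (Pi : List (List (List Int)))
    (h : Pi.all (fun P => P.all (fun t => t.length == 1)) = false) :
    ((PySem.List.enumerate Pi 0).filter
        (fun q => q.2.any (fun t => t.length != 1))).map (·.1) ≠ [] := by
  simp only [ne_eq, List.map_eq_nil_iff, List.filter_eq_nil_iff]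
  intro hall
  rw [List.all_eq_false] at h
  obtain ⟨P, hP, hPn⟩ := h
  obtain ⟨k, hk, hPk⟩ := List.mem_iff_getElem.mp hP
  have hmem : ((0 : Int) + k, Pi[k]) ∈ PySem.List.enumerate Pi 0 := by
    rw [PySem.List.mem_enumerate_iff]; exact ⟨k, hk, rfl⟩
  have hfa := hall _ hmem
  rw [Bool.not_eq_true, List.any_eq_false] at hfa
  simp only [List.all_eq_true] at hPn
  apply hPn
  intro t ht
  have := hfa t (by rw [hPk]; exact ht)
  simpa using this

theorem combine_main (Pi_lists : List (List (List Int))) :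
    combine_With_swapping Pi_lists = combine_With_swapping_alt Pi_lists := by
  simp only [combine_With_swapping, combine_With_swapping_alt]
  by_cases hk : (PySem.List.len Pi_lists == 1) = true
  · rw [if_pos hk, if_pos hk]
  · rw [if_neg hk, if_neg hk]
    have e1 : (PySem.List.pyRange 0 (PySem.List.len Pi_lists) 1).foldl
        (fun st i => scanSet st (i, PySem.List.pyGetD Pi_lists i []))
        ((true : Bool), ([] : List Int), (0 : Int))
        = (PySem.List.enumerate Pi_lists 0).foldl scanSet
            ((true : Bool), ([] : List Int), (0 : Int)) := by
      rw [PySem.List.enumerate_eq_map_pyRange (d := ([] : List (List Int))), List.foldl_map]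
    have hst := e1.trans (outer_char Pi_lists 0 true [] 0 (by simp))
    rw [hst]
    simp only [Bool.true_and, List.nil_append]
    by_cases hall : Pi_lists.all (fun P => P.all (fun t => t.length == 1)) = true
    · rw [if_pos hall, if_pos hall, if_pos hall, if_pos hall]
      simp only [PySem.List.foldl_append_eq_flatMap, List.nil_append]
    · have hall' : Pi_lists.all (fun P => P.all (fun t => t.length == 1)) = false := by
        simpa using hall
      rw [if_neg hall, if_neg hall, if_neg hall, if_neg hall]
      have key1 : (((PySem.List.enumerate Pi_lists 0).filter
            (fun q => q.2.any (fun t => t.length == 1))).map (·.1)).map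
              (fun x => PySem.List.pyGetD Pi_lists x []) =
          Pi_lists.filter (fun P => P.any (fun seq => seq.length == 1)) := by
        rw [List.map_map]
        have h := enum_filter_getD (fun P => P.any (fun t => t.length == 1)) Pi_lists []
        simpa using h
      have hne := filtered_ne_nil Pi_lists hall'
      have key2 : (((PySem.List.enumerate Pi_lists 0).filter
            (fun q => q.2.any (fun t => t.length != 1))).map (·.1)).getLastD 0 =
          PySem.List.pyGetD (((PySem.List.enumerate Pi_lists 0).filter
            (fun q => q.2.any (fun t => t.length != 1))).map (·.1)) (-1) 0 := by
        rw [PySem.List.pyGetD_neg_one _ _ hne, getLastD_of_ne_nil _ hne]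
      rw [key1, key2]
      simp only [PySem.List.foldl_append_singleton_eq_self,
        PySem.List.foldl_append_eq_flatMap, List.nil_append]
      apply List.flatMap_congr
      intro sb _
      apply List.flatMap_congr
      intro s _
      rw [interweave_eq_comb sb s 0 le_rfl]
      have hcomm : (s.length : Int) + (sb.length : Int)
          = (sb.length : Int) + (s.length : Int) := by ring
      rw [hcomm]

-- ===== VERDICT (by name: the statement is the Claim_ definition above) =====
theorem combine_With_swapping_spec : Claim_equal_combine_With_swapping := by
  unfold Claim_equal_combine_With_swapping
  intro Pi_lists _ _
  unfold Spec_combine_With_swapping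
  exact combine_main Pi_lists
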